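-- pv_equiv track=rewrite | github.com/gediminasz/simracing | simracing/strategy.py | _partition_stints
-- ===== SOURCE A (Python) =====
-- def _partition_stints(strategy):
--     stints = [[strategy[0], 1]]
--     for compound in strategy[1:]:
--         if compound == -1:  # no tyre change
--             stints[-1][1] += 1  # one more lap in current stint
--         else:
--             stints.append([compound, 1])
--     return stints
-- ===== SOURCE B (Python) =====
-- def _partition_stints(strategy):
--     # Build the stints back-to-front: scan the tail right-to-left counting
--     # trailing -1 runs, append-only (no mutation of the last stint), reverse once.
--     rev = []
--     run = 0
--     for compound in reversed(strategy[1:]):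
--         if compound == -1:
--             run += 1
--         else:
--             rev.append([compound, 1 + run])
--             run = 0
--     rev.append([strategy[0], 1 + run])
--     rev.reverse()
--     return rev
-- ===== Notes on version B (the rewrite author's own statement) =====
-- stated objective: alternative
-- what changed: Replaces the left-to-right fold that mutates the last stint in place (stints[-1][1] += 1) with a right-to-left scan that counts each run of -1 before emitting its stint, building the list append-only and reversing once.
import Mathlib
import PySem

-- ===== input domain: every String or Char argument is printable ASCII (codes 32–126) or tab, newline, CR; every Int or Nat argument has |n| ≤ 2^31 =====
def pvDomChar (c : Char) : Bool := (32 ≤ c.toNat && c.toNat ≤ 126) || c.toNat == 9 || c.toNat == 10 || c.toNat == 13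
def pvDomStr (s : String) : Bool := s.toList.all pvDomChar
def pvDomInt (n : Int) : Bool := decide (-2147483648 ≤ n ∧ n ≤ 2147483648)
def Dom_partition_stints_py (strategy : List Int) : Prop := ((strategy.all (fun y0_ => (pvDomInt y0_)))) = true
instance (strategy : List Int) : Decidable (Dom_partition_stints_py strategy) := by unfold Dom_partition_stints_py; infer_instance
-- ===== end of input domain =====

-- B builds the stints back-to-front (right-to-left run counting, append-only, one reverse)
-- instead of A's left fold that mutates the last stint; objective: alternative decomposition.
-- Pre_ excludes the empty list, on which both Pythons raise IndexError (strategy[0]).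


-- ===== PORT A =====
-- stints[-1][1] += 1 : increment the second entry of the last element
def pvInc1 (s : List Int) : List Int :=
  match s with
  | a :: b :: u => a :: (b + 1) :: u
  | s => s

def pvIncLast : List (List Int) → List (List Int)
  | [] => []
  | [s] => [pvInc1 s]
  | s :: rest => s :: pvIncLast rest

def pvStepA (stints : List (List Int)) (compound : Int) : List (List Int) :=
  if compound = -1 then pvIncLast stints else stints ++ [[compound, 1]]

def partition_stints_py (strategy : List Int) : List (List Int) :=
  match strategy with
  | [] => []  -- strategy[0] raises IndexError; excluded by Pre_
  | h :: _ =>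
    (PySem.List.slice strategy (some 1) none).foldl pvStepA [[h, 1]]

-- ===== PORT B =====
def pvStepB (st : List (List Int) × Int) (compound : Int) : List (List Int) × Int :=
  if compound = -1 then (st.1, st.2 + 1) else (st.1 ++ [[compound, 1 + st.2]], 0)

def partition_stints_py_alt (strategy : List Int) : List (List Int) :=
  match strategy with
  | [] => []  -- strategy[0] raises IndexError; excluded by Pre_
  | h :: _ =>
    let p := ((PySem.List.slice strategy (some 1) none).reverse).foldl pvStepB ([], 0)
    (p.1 ++ [[h, 1 + p.2]]).reverse

-- ===== PRECONDITION & SPEC =====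
-- Both programs raise IndexError on the empty list (strategy[0]); nothing else is excluded.
def Pre_partition_stints_py (strategy : List Int) : Prop := strategy ≠ []
instance (strategy : List Int) : Decidable (Pre_partition_stints_py strategy) := by
  unfold Pre_partition_stints_py; infer_instance

def pvWitness_partition_stints_py : List Int := [1, -1, 2]

def Spec_partition_stints_py (strategy : List Int) (out : List (List Int)) : Prop := out = partition_stints_py_alt strategy
instance (strategy : List Int) (out : List (List Int)) : Decidable (Spec_partition_stints_py strategy out) := by unfold Spec_partition_stints_py; infer_instance

-- ===== CLAIM (what is proved, stated in full; the proofs are below) =====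
def Claim_equal_partition_stints_py : Prop := ∀ (strategy : List Int), Dom_partition_stints_py strategy → Pre_partition_stints_py strategy → Spec_partition_stints_py strategy (partition_stints_py strategy)

-- ===== LEMMAS AND PROOFS =====
-- B's right-to-left pass, as a foldr (the port's foldl over the reversed tail)
def pvFoldB (t : List Int) : List (List Int) × Int :=
  t.foldr (fun x acc => pvStepB acc x) ([], 0)

theorem pvIncLast_append (init : List (List Int)) (c m : Int) :
    pvIncLast (init ++ [[c, m]]) = init ++ [[c, m + 1]] := by
  induction init with
  | nil => simp [pvIncLast, pvInc1]
  | cons a l ih =>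
    cases h : l ++ [[c, m]] with
    | nil => simp at h
    | cons y ys =>
      simp only [List.cons_append, h, pvIncLast]
      rw [← h, ih]

theorem pvKey (t : List Int) (init : List (List Int)) (c m : Int) :
    t.foldl pvStepA (init ++ [[c, m]]) =
      init ++ ((pvFoldB t).1 ++ [[c, m + (pvFoldB t).2]]).reverse := by
  induction t generalizing init c m with
  | nil => simp [pvFoldB]
  | cons x t ih =>
    by_cases hx : x = -1
    · subst hx
      have h1 : pvStepA (init ++ [[c, m]]) (-1) = init ++ [[c, m + 1]] := by
        simp [pvStepA, pvIncLast_append]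
      have h2 : pvFoldB (-1 :: t) = ((pvFoldB t).1, (pvFoldB t).2 + 1) := by
        simp [pvFoldB, pvStepB]
      rw [List.foldl_cons, h1, ih, h2]
      have h3 : m + ((pvFoldB t).2 + 1) = m + 1 + (pvFoldB t).2 := by ring
      rw [h3]
    · have h1 : pvStepA (init ++ [[c, m]]) x = (init ++ [[c, m]]) ++ [[x, 1]] := by
        simp [pvStepA, hx]
      have h2 : pvFoldB (x :: t) = ((pvFoldB t).1 ++ [[x, 1 + (pvFoldB t).2]], 0) := by
        simp [pvFoldB, pvStepB, hx]
      rw [List.foldl_cons, h1, ih, h2]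
      simp [List.reverse_append]

-- ===== VERDICT (by name: the statement is the Claim_ definition above) =====
theorem partition_stints_py_spec : Claim_equal_partition_stints_py := by
  intro strategy _ hpre
  unfold Spec_partition_stints_py
  cases strategy with
  | nil => exact absurd rfl hpre
  | cons h t =>
    simp only [partition_stints_py, partition_stints_py_alt,
      PySem.List.slice_from_one, List.tail_cons, List.foldl_reverse]
    have := pvKey t [] h 1
    simp only [List.nil_append] at this
    rw [this]
    rfl
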